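-- pv_equiv track=rewrite | github.com/mmxsrup/icfpc2020 | app/interpreter.py | modulate
-- ===== SOURCE A (Python) =====
-- import math
--
-- def modulate(x: int) -> str:
--     res = ""
--     # signal
--     if x >= 0:
--         res += "01"
--     else:
--         res += "10"
--     x = abs(x)
--     # bit length
--     bit_length = 0
--     while (1 << bit_length) <= x:
--         bit_length += 1
--     bit_length = math.ceil(bit_length / 4) * 4
--     for i in range(bit_length // 4):
--         res += "1"
--     res += "0"
--
--     # number
--     res2 = ""
--     while x > 0:
--         res2 += "1" if x % 2 > 0 else "0"
--         x = x // 2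
--     while len(res2) < bit_length:
--         res2 += "0"
--     res += res2[::-1]
--     return res
-- ===== SOURCE B (Python) =====
-- def _bits(n: int, w: int) -> str:
--     # MSB-first binary rendering of n, exactly w characters (high bits are 0)
--     if w == 0:
--         return ""
--     return _bits(n >> 1, w - 1) + ("1" if n & 1 else "0")
--
-- def modulate(x: int) -> str:
--     sign = "01" if x >= 0 else "10"
--     n = abs(x)
--     width = (n.bit_length() + 3) // 4 * 4
--     return sign + "1" * (width // 4) + "0" + _bits(n, width)
-- ===== Notes on version B (the rewrite author's own statement) =====
-- stated objective: simpler
-- what changed: B replaces A's three loops (shift-probe bit-length loop, LSB digit-extraction loop plus zero-padding loop and a final reverse) with int.bit_length() for the width and a single MSB-first recursion over the width that emits the zero-padded payload directly, and builds the unary marker with '1'*k.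
import Mathlib
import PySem

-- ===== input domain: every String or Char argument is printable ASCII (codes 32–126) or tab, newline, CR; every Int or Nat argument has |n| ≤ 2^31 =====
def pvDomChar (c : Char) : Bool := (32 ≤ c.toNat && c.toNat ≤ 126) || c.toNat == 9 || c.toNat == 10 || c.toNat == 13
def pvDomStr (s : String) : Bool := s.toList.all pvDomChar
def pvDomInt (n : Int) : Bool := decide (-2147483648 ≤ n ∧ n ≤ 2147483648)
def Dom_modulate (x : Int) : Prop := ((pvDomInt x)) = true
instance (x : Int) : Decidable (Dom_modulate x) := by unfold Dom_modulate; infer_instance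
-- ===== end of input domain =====

-- B renders the payload MSB-first in one width-bounded recursion (and the width via
-- int.bit_length) instead of A's shift-probe loop, LSB extraction loop, padding loop
-- and final reverse; objective: simpler.

-- ===== PORT A =====
-- while (1 << bit_length) <= x: bit_length += 1
-- (fuel only makes the loop total; with the fuel modulate passes it never runs out)
def pvA_bitLenLoop (x : Int) (fuel : Nat) (b : Nat) : Nat :=
  match fuel with
  | 0 => b
  | fuel + 1 => if (1 : Int) <<< b ≤ x then pvA_bitLenLoop x fuel (b + 1) else b

-- while x > 0: res2 += bit; x = x // 2   (LSB-first digit list; fuel as above)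
def pvA_digits (fuel : Nat) (x : Int) : List Char :=
  match fuel with
  | 0 => []
  | fuel + 1 =>
    if 0 < x then
      (if PySem.Int.mod x 2 > 0 then '1' else '0') :: pvA_digits fuel (PySem.Int.floordiv x 2)
    else []

-- while len(res2) < bit_length: res2 += "0"   (fuel as above)
def pvA_pad (fuel : Nat) (l : List Char) (bl : Nat) : List Char :=
  match fuel with
  | 0 => l
  | fuel + 1 => if l.length < bl then pvA_pad fuel (l ++ ['0']) bl else l

def modulate (x : Int) : String :=
  let res : List Char := if x ≥ 0 then "01".toList else "10".toList
  let x1 : Int := |x|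
  let bl0 : Nat := pvA_bitLenLoop x1 (x1.toNat + 1) 0
  -- math.ceil(bit_length / 4) * 4 : exact (bit_length/4 is an exact small float)
  let bl : Nat := (bl0 + 3) / 4 * 4
  let res := (PySem.List.pyRange 0 (bl / 4 : Nat) 1).foldl (fun a _ => a ++ ['1']) res
  let res := res ++ ['0']
  let res2 := pvA_digits x1.toNat x1
  let res2 := pvA_pad bl res2 bl
  String.mk (res ++ res2.reverse)

-- ===== PORT B =====
-- _bits(n, w): MSB-first binary rendering of n, exactly w characters
def pvB_bits (n w : Nat) : List Char :=
  match w with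
  | 0 => []
  | w + 1 => pvB_bits (n >>> 1) w ++ [if n &&& 1 == 1 then '1' else '0']

def modulate_alt (x : Int) : String :=
  let sign : List Char := if x ≥ 0 then "01".toList else "10".toList
  let n : Nat := x.natAbs
  let width : Nat := (PySem.Int.bitLength x + 3) / 4 * 4
  String.mk (sign ++ List.replicate (width / 4) '1' ++ ['0'] ++ pvB_bits n width)

-- ===== PRECONDITION & SPEC =====
def Spec_modulate (x : Int) (out : String) : Prop := out = modulate_alt x
instance (x : Int) (out : String) : Decidable (Spec_modulate x out) := by unfold Spec_modulate; infer_instance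

-- ===== CLAIM (what is proved, stated in full; the proofs are below) =====
def Claim_equal_modulate : Prop := ∀ (x : Int), Dom_modulate x → Spec_modulate x (modulate x)

-- ===== LEMMAS AND PROOFS =====

-- the first w bits of n, LSB first (proof-only bridge between the two payload builders)
def pvLsb (n w : Nat) : List Char :=
  match w with
  | 0 => []
  | w + 1 => (if n % 2 = 1 then '1' else '0') :: pvLsb (n / 2) w

theorem pvB_bits_eq_reverse (w : Nat) : ∀ n, pvB_bits n w = (pvLsb n w).reverse := by
  induction w with
  | zero => intro n; rfl
  | succ w ih =>
    intro n
    simp [pvB_bits, pvLsb, ih, Nat.shiftRight_one, Nat.and_one_is_mod]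

theorem pvA_pad_eq (bl : Nat) : ∀ (fuel : Nat) (l : List Char), bl - l.length ≤ fuel →
    pvA_pad fuel l bl = l ++ List.replicate (bl - l.length) '0' := by
  intro fuel
  induction fuel with
  | zero =>
    intro l h
    have : bl - l.length = 0 := by omega
    simp [pvA_pad, this]
  | succ fuel ih =>
    intro l h
    rw [pvA_pad]
    by_cases hl : l.length < bl
    · simp only [hl, if_pos]
      rw [ih (l ++ ['0']) (by simp; omega)]
      have : bl - l.length = (bl - (l ++ ['0']).length) + 1 := by simp; omega
      rw [this, List.replicate_succ, List.append_assoc]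
      rfl
    · have : bl - l.length = 0 := by omega
      simp [hl, this]

theorem pvA_digits_pad (w : Nat) : ∀ (x : Int) (fuel : Nat), 0 ≤ x → x < 2 ^ w → x.toNat ≤ fuel →
    pvA_digits fuel x ++ List.replicate (w - (pvA_digits fuel x).length) '0' = pvLsb x.toNat w := by
  induction w with
  | zero =>
    intro x fuel h0 hlt _
    have : x = 0 := by omega
    subst this
    cases fuel <;> simp [pvA_digits, pvLsb]
  | succ w ih =>
    intro x fuel h0 hlt hfuel
    by_cases hx : 0 < x
    · obtain ⟨fuel, rfl⟩ : ∃ f, fuel = f + 1 := ⟨fuel - 1, by omega⟩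
      rw [pvA_digits]
      have hfd : PySem.Int.floordiv x 2 = x / 2 := PySem.Int.floordiv_eq_ediv_of_pos (by omega)
      have hmd : PySem.Int.mod x 2 = x % 2 := PySem.Int.mod_eq_emod_of_pos (by omega)
      simp only [hx, if_pos]
      have hrec := ih (x / 2) fuel (by omega) (by rw [pow_succ] at hlt; omega) (by omega)
      rw [hfd, hmd]
      have hbit : (x % 2 > 0) = (x.toNat % 2 = 1) := by
        simp only [eq_iff_iff]; omega
      have htn : (x / 2).toNat = x.toNat / 2 := by omega
      rw [htn] at hrec
      simp only [pvLsb, List.cons_append, List.length_cons, hbit]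
      rw [show w + 1 - ((pvA_digits fuel (x / 2)).length + 1) = w - (pvA_digits fuel (x / 2)).length by omega]
      rw [hrec]
    · have hx0 : x = 0 := by omega
      subst hx0
      have hd : pvA_digits fuel 0 = [] := by cases fuel <;> simp [pvA_digits]
      rw [hd]
      simp only [List.nil_append, List.length_nil, Nat.sub_zero, List.replicate_succ]
      have := ih 0 0 le_rfl (by positivity) le_rfl
      rw [show ((0 : Int)).toNat = 0 by rfl] at this ⊢
      simp only [pvA_digits, List.nil_append, List.length_nil, Nat.sub_zero] at this
      rw [pvLsb, Nat.zero_div, Nat.zero_mod, ← this]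
      simp

theorem pvA_bitLenLoop_eq (x : Int) (hx : 0 ≤ x) :
    ∀ (fuel b : Nat), b ≤ PySem.Int.bitLength x → PySem.Int.bitLength x - b ≤ fuel →
      pvA_bitLenLoop x fuel b = PySem.Int.bitLength x := by
  intro fuel
  induction fuel with
  | zero =>
    intro b hb hf
    have : b = PySem.Int.bitLength x := by omega
    simp [pvA_bitLenLoop, this]
  | succ fuel ih =>
    intro b hb hf
    rw [pvA_bitLenLoop]
    have h2 : (1 : Int) <<< b = 2 ^ b := by simp [Int.shiftLeft_eq]
    by_cases h : (1 : Int) <<< b ≤ x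
    · simp only [h, if_pos]
      rw [h2] at h
      -- 2^b ≤ x implies b < bitLength x
      have hlt : x.natAbs < 2 ^ PySem.Int.bitLength x := PySem.Int.lt_two_pow_bitLength x
      have hbL : b < PySem.Int.bitLength x := by
        by_contra hc
        push Not at hc
        have h1 : (2 : Int) ^ PySem.Int.bitLength x ≤ 2 ^ b :=
          pow_le_pow_right₀ (by norm_num) hc
        have h3 : (x.natAbs : Int) < 2 ^ b := by
          calc (x.natAbs : Int) < ((2 ^ PySem.Int.bitLength x : Nat) : Int) := by exact_mod_cast hlt
            _ = 2 ^ PySem.Int.bitLength x := by push_cast; ring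
            _ ≤ 2 ^ b := h1
        omega
      exact ih (b + 1) (by omega) (by omega)
    · simp only [h, if_neg, not_false_iff]
      rw [h2] at h
      push Not at h
      -- x < 2^b and b ≤ bitLength x force b = bitLength x
      by_contra hc
      have hbL : b < PySem.Int.bitLength x := by omega
      have hxne : x ≠ 0 := by
        intro h0
        subst h0
        simp [PySem.Int.bitLength_zero] at hbL
      have hle : 2 ^ (PySem.Int.bitLength x - 1) ≤ x.natAbs := PySem.Int.two_pow_bitLength_le x hxne
      have hmono : (2 : Nat) ^ b ≤ 2 ^ (PySem.Int.bitLength x - 1) :=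
        Nat.pow_le_pow_right (by norm_num) (by omega)
      have : (2 : Int) ^ b ≤ (x.natAbs : Int) := by
        calc (2 : Int) ^ b = ((2 ^ b : Nat) : Int) := by push_cast; ring
          _ ≤ ((2 ^ (PySem.Int.bitLength x - 1) : Nat) : Int) := by exact_mod_cast hmono
          _ ≤ (x.natAbs : Int) := by exact_mod_cast hle
      omega

theorem pvFoldOnes {α : Type} (l : List α) : ∀ res : List Char,
    l.foldl (fun a _ => a ++ ['1']) res = res ++ List.replicate l.length '1' := by
  induction l with
  | nil => intro res; simp
  | cons a l ih =>
    intro res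
    simp [List.foldl_cons, ih, List.replicate_succ, List.append_assoc]

theorem pvBitLen_le (x : Int) (hx : 0 ≤ x) : PySem.Int.bitLength x ≤ x.toNat + 1 := by
  by_cases h0 : x = 0
  · subst h0; simp [PySem.Int.bitLength_zero]
  · have hle : 2 ^ (PySem.Int.bitLength x - 1) ≤ x.natAbs := PySem.Int.two_pow_bitLength_le x h0
    have hlt : PySem.Int.bitLength x - 1 < 2 ^ (PySem.Int.bitLength x - 1) := Nat.lt_two_pow_self
    omega

-- ===== VERDICT (by name: the statement is the Claim_ definition above) =====
theorem modulate_spec : Claim_equal_modulate := by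
  intro x _
  unfold Spec_modulate modulate modulate_alt
  have habs : (0 : Int) ≤ |x| := abs_nonneg x
  have hblabs : PySem.Int.bitLength |x| = PySem.Int.bitLength x := by
    by_cases h : 0 ≤ x
    · rw [abs_of_nonneg h]
    · rw [abs_of_neg (by omega)]; exact PySem.Int.bitLength_neg x
  have hbl : pvA_bitLenLoop |x| (|x|.toNat + 1) 0 = PySem.Int.bitLength x := by
    rw [pvA_bitLenLoop_eq |x| habs (|x|.toNat + 1) 0 (Nat.zero_le _)
      (by have := pvBitLen_le |x| habs; omega), hblabs]
  set L := PySem.Int.bitLength x with hL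
  set w := (L + 3) / 4 * 4 with hw
  have hLw : L ≤ w := by omega
  have hltw : |x| < 2 ^ w := by
    have h3 : x.natAbs < 2 ^ w :=
      lt_of_lt_of_le (PySem.Int.lt_two_pow_bitLength x) (Nat.pow_le_pow_right (by norm_num) hLw)
    rw [Int.abs_eq_natAbs]
    calc (x.natAbs : Int) < ((2 ^ w : Nat) : Int) := by exact_mod_cast h3
      _ = 2 ^ w := by push_cast; ring
  have hpayload : (pvA_pad w (pvA_digits |x|.toNat |x|) w).reverse = pvB_bits x.natAbs w := by
    rw [pvA_pad_eq w w (pvA_digits |x|.toNat |x|) (by omega),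
        pvA_digits_pad w |x| |x|.toNat habs hltw le_rfl, pvB_bits_eq_reverse]
    rw [show |x|.toNat = x.natAbs by rw [Int.abs_eq_natAbs]; exact Int.toNat_natCast _]
  have hones := pvFoldOnes (PySem.List.pyRange 0 ((w / 4 : Nat) : Int) 1)
       (if x ≥ 0 then "01".toList else "10".toList)
  have hlen : (PySem.List.pyRange 0 ((w / 4 : Nat) : Int) 1).length = w / 4 := by
    rw [PySem.List.length_pyRange_one]; omega
  simp only [hbl, ← hw, hones, hlen, hpayload, List.append_assoc]
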